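-- pv_equiv track=rewrite | github.com/chunge16/chunge-skills | skills/chunge-xhs-images/scripts/init_xhs_project.py | page_labels
-- ===== SOURCE A (Python) =====
-- def page_labels(pages: int) -> list[str]:
--     if pages <= 1:
--         return ["cover"]
--     if pages == 2:
--         return ["cover", "ending"]
--     if pages == 3:
--         return ["cover", "content-1", "ending"]
--
--     middle_count = pages - 2
--     labels = ["cover"]
--     labels.extend(f"content-{index}" for index in range(1, middle_count + 1))
--     labels.append("ending")
--     return labels
-- ===== SOURCE B (Python) =====
-- def page_labels(pages: int) -> list[str]:
--     if pages <= 1: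
--         return ["cover"]
--     result = []
--     for index in range(pages):
--         if index == 0:
--             result.append("cover")
--         elif index == pages - 1:
--             result.append("ending")
--         else:
--             result.append(f"content-{index}")
--     return result
-- ===== Notes on version B (the rewrite author's own statement) =====
-- stated objective: simpler
-- what changed: Replaces A's three special-case returns plus three-segment concatenation (cover + generator of middles + ending) with a single position-driven loop over range(pages) that picks each label by its index.
import Mathlib
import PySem

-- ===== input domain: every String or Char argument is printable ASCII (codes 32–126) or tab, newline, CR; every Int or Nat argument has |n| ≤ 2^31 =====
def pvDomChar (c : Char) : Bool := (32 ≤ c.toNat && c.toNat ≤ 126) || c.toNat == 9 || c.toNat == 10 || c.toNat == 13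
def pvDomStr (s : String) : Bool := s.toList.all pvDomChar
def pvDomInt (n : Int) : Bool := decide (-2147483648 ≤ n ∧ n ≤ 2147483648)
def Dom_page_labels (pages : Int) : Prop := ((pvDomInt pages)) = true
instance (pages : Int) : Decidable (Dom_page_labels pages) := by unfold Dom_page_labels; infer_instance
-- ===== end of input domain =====

-- B replaces A's special cases and three-segment concatenation by one position-driven
-- loop over range(pages); objective: simpler.

-- ===== PORT A =====
def page_labels (pages : Int) : List String :=
  if pages ≤ 1 then ["cover"]
  else if pages = 2 then ["cover", "ending"]
  else if pages = 3 then ["cover", "content-1", "ending"]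
  else
    let middle_count := pages - 2
    let labels := ["cover"]
    let labels := labels ++ (PySem.List.pyRange 1 (middle_count + 1) 1).map
      (fun index => "content-" ++ PySem.Int.toStr index)
    labels ++ ["ending"]

-- ===== PORT B =====
def page_labels_alt (pages : Int) : List String :=
  if pages ≤ 1 then ["cover"]
  else
    (PySem.List.pyRange 0 pages 1).foldl
      (fun result index =>
        result ++ [if index = 0 then "cover"
                   else if index = pages - 1 then "ending"
                   else "content-" ++ PySem.Int.toStr index]) []

-- ===== PRECONDITION & SPEC =====
def Spec_page_labels (pages : Int) (out : List String) : Prop := out = page_labels_alt pages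
instance (pages : Int) (out : List String) : Decidable (Spec_page_labels pages out) := by unfold Spec_page_labels; infer_instance

-- ===== CLAIM (what is proved, stated in full; the proofs are below) =====
def Claim_equal_page_labels : Prop := ∀ (pages : Int), Dom_page_labels pages → Spec_page_labels pages (page_labels pages)

-- ===== LEMMAS AND PROOFS =====

theorem foldl_append_singleton (l : List Int) (g : Int → String) (init : List String) :
    l.foldl (fun r i => r ++ [g i]) init = init ++ l.map g := by
  induction l generalizing init with
  | nil => simp
  | cons x xs ih => simp [List.foldl, ih]

theorem alt_eq (pages : Int) (h : ¬ pages ≤ 1) :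
    page_labels_alt pages =
      "cover" :: (PySem.List.pyRange 1 (pages - 1) 1).map
        (fun i => "content-" ++ PySem.Int.toStr i) ++ ["ending"] := by
  unfold page_labels_alt
  rw [if_neg h, foldl_append_singleton]
  have h0 : (0 : Int) < pages := by omega
  have h1 : (1 : Int) ≤ pages - 1 := by omega
  rw [PySem.List.pyRange_one_cons h0]
  simp only [zero_add]
  rw [PySem.List.pyRange_one_append 1 (pages - 1) pages h1 (by omega)]
  have hlast : PySem.List.pyRange (pages - 1) pages 1 = [pages - 1] := by
    have := PySem.List.pyRange_one_singleton (a := pages - 1)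
    simpa [show pages - 1 + 1 = pages by omega] using this
  rw [hlast]
  simp only [List.map_append, List.map]
  have hmid : (PySem.List.pyRange 1 (pages - 1) 1).map
      (fun i => if i = 0 then "cover" else if i = pages - 1 then "ending"
                else "content-" ++ PySem.Int.toStr i)
      = (PySem.List.pyRange 1 (pages - 1) 1).map
      (fun i => "content-" ++ PySem.Int.toStr i) := by
    apply List.map_congr_left
    intro i hi
    rw [PySem.List.mem_pyRange_one] at hi
    rw [if_neg (by omega), if_neg (by omega)]
  rw [hmid]
  simp [if_neg (by omega : ¬ pages - 1 = 0)]

-- ===== VERDICT (by name: the statement is the Claim_ definition above) =====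
theorem page_labels_spec : Claim_equal_page_labels := by
  intro pages _
  unfold Spec_page_labels
  by_cases h1 : pages ≤ 1
  · simp [page_labels, page_labels_alt, h1]
  · rw [alt_eq pages h1]
    unfold page_labels
    rw [if_neg h1]
    by_cases h2 : pages = 2
    · subst h2; decide
    · by_cases h3 : pages = 3
      · subst h3; decide
      · rw [if_neg h2, if_neg h3]
        simp [show pages - 2 + 1 = pages - 1 by omega]
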